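-- pv_equiv track=rewrite | github.com/nochez/smurfer | main.py | color_it
-- ===== SOURCE A (Python) =====
-- def color_it(data, smurfcode, ref_elo):
--     R = "\033[0;31;40m" #RED
--     G = "\033[0;32;40m" # GREEN
--     Y = "\033[0;33;40m" # Yellow
--     B = "\033[0;34;40m" # Blue
--     N = "\033[0m" # Reset
--
--     games_color = [N, Y][smurfcode & 1]
--     ratio_color = [N, N, Y, Y][smurfcode & 2]
--     smurfname_color = [N, Y, Y, R][smurfcode]
--
--     elo_range_dif = [abs((data[1] - ref_elo) - x) for x in [-50, 0, 40, 100]]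
--     min_index = elo_range_dif.index(min(elo_range_dif))
--     elo_color = [G, N, Y, R][min_index]
--
--
--     return [smurfname_color+data[0]+N,
--             elo_color+str(data[1])+N,
--             ratio_color+str(data[2])+N,
--             ratio_color+str(data[3])+N,
--             games_color+str(data[4])+N,
--             smurfname_color+data[5]+N]
-- ===== SOURCE B (Python) =====
-- def color_it(data, smurfcode, ref_elo):
--     R = "\033[0;31;40m"
--     G = "\033[0;32;40m"
--     Y = "\033[0;33;40m"
--     N = "\033[0m"
--
--     def wrap(color, text):
--         return color + text + N
--
--     games_color = (N, Y)[smurfcode % 2]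
--     ratio_color = (N, Y)[smurfcode // 2 % 2]
--     smurfname_color = (N, Y, Y, R)[smurfcode]
--
--     diff = data[1] - ref_elo
--     if diff <= -25:
--         elo_color = G
--     elif diff <= 20:
--         elo_color = N
--     elif diff <= 70:
--         elo_color = Y
--     else:
--         elo_color = R
--
--     return [wrap(smurfname_color, data[0]),
--             wrap(elo_color, str(data[1])),
--             wrap(ratio_color, str(data[2])),
--             wrap(ratio_color, str(data[3])),
--             wrap(games_color, str(data[4])),
--             wrap(smurfname_color, data[5])]
-- ===== Notes on version B (the rewrite author's own statement) =====
-- stated objective: simpler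
-- what changed: Replaces A's list-comprehension-plus-index(min) argmin scan over the four reference elo offsets with a closed-form threshold cascade over their midpoints (-25/20/70), and replaces the bitmask-indexed games/ratio color lookups with %-and-// arithmetic selection plus a wrap helper for the returned strings.
import Mathlib
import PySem

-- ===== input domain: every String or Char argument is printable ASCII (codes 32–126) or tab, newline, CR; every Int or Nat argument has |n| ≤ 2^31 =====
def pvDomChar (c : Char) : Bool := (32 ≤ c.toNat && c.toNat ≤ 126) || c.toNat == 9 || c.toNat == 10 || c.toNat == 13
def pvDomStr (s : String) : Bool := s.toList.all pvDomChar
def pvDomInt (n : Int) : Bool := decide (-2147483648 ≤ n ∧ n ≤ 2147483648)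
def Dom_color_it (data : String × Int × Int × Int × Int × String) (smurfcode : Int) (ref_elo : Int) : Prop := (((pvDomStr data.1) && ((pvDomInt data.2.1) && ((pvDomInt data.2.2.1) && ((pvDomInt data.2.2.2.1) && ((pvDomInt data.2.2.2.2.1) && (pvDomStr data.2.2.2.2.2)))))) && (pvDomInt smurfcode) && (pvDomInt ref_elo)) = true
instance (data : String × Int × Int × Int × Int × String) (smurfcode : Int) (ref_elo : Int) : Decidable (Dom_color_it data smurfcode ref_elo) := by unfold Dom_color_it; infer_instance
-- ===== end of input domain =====

-- B replaces A's argmin scan over the four reference elo offsets by a closed-form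
-- threshold cascade over the midpoints, and replaces the bitmask-indexed color lookups
-- by arithmetic selection; objective: simpler.

-- ===== PORT A =====
def color_it (data : String × Int × Int × Int × Int × String) (smurfcode : Int) (ref_elo : Int) : List String :=
  let R := "\x1b[0;31;40m"
  let G := "\x1b[0;32;40m"
  let Y := "\x1b[0;33;40m"
  let N := "\x1b[0m"
  -- (A also defines a Blue constant it never uses; omitted)
  let games_color := PySem.List.pyGetD [N, Y] (PySem.Int.band smurfcode 1) ""
  let ratio_color := PySem.List.pyGetD [N, N, Y, Y] (PySem.Int.band smurfcode 2) ""
  let smurfname_color := PySem.List.pyGetD [N, Y, Y, R] smurfcode ""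
  let elo_range_dif := [(-50 : Int), 0, 40, 100].map (fun x => |(data.2.1 - ref_elo) - x|)
  let min_index : Nat :=
    (PySem.List.index? elo_range_dif ((PySem.List.min? elo_range_dif (fun y => y)).getD 0)).getD 0
  let elo_color := PySem.List.pyGetD [G, N, Y, R] (min_index : Int) ""
  [smurfname_color ++ data.1 ++ N,
   elo_color ++ PySem.Int.toStr data.2.1 ++ N,
   ratio_color ++ PySem.Int.toStr data.2.2.1 ++ N,
   ratio_color ++ PySem.Int.toStr data.2.2.2.1 ++ N,
   games_color ++ PySem.Int.toStr data.2.2.2.2.1 ++ N,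
   smurfname_color ++ data.2.2.2.2.2 ++ N]

-- ===== PORT B =====
def pvWrap (color text reset : String) : String := color ++ text ++ reset

def color_it_alt (data : String × Int × Int × Int × Int × String) (smurfcode : Int) (ref_elo : Int) : List String :=
  let R := "\x1b[0;31;40m"
  let G := "\x1b[0;32;40m"
  let Y := "\x1b[0;33;40m"
  let N := "\x1b[0m"
  let games_color := PySem.List.pyGetD [N, Y] (PySem.Int.mod smurfcode 2) ""
  let ratio_color := PySem.List.pyGetD [N, Y] (PySem.Int.mod (PySem.Int.floordiv smurfcode 2) 2) ""
  let smurfname_color := PySem.List.pyGetD [N, Y, Y, R] smurfcode ""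
  let diff := data.2.1 - ref_elo
  let elo_color := if diff ≤ -25 then G else if diff ≤ 20 then N else if diff ≤ 70 then Y else R
  [pvWrap smurfname_color data.1 N,
   pvWrap elo_color (PySem.Int.toStr data.2.1) N,
   pvWrap ratio_color (PySem.Int.toStr data.2.2.1) N,
   pvWrap ratio_color (PySem.Int.toStr data.2.2.2.1) N,
   pvWrap games_color (PySem.Int.toStr data.2.2.2.2.1) N,
   pvWrap smurfname_color data.2.2.2.2.2 N]

-- ===== PRECONDITION & SPEC =====
-- Pre_ excludes exactly smurfcode outside -4..3, where A's 4-element list lookup raises IndexError (B raises too).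
def Pre_color_it (data : String × Int × Int × Int × Int × String) (smurfcode : Int) (ref_elo : Int) : Prop :=
  -4 ≤ smurfcode ∧ smurfcode ≤ 3
instance (data : String × Int × Int × Int × Int × String) (smurfcode : Int) (ref_elo : Int) : Decidable (Pre_color_it data smurfcode ref_elo) := by unfold Pre_color_it; infer_instance

def pvWitness_color_it : (String × Int × Int × Int × Int × String) × Int × Int :=
  (("alice", 1500, 3, 2, 10, "bob"), 2, 1450)

def Spec_color_it (data : String × Int × Int × Int × Int × String) (smurfcode : Int) (ref_elo : Int) (out : List String) : Prop := out = color_it_alt data smurfcode ref_elo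
instance (data : String × Int × Int × Int × Int × String) (smurfcode : Int) (ref_elo : Int) (out : List String) : Decidable (Spec_color_it data smurfcode ref_elo out) := by unfold Spec_color_it; infer_instance

-- ===== CLAIM (what is proved, stated in full; the proofs are below) =====
def Claim_equal_color_it : Prop := ∀ (data : String × Int × Int × Int × Int × String) (smurfcode : Int) (ref_elo : Int), Dom_color_it data smurfcode ref_elo → Pre_color_it data smurfcode ref_elo → Spec_color_it data smurfcode ref_elo (color_it data smurfcode ref_elo)

-- ===== LEMMAS AND PROOFS =====

lemma pick0 (a b c e : Int) (h1 : a ≤ b) (h2 : a ≤ c) (h3 : a ≤ e) :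
    (([a, b, c, e].idxOf? (min (min (min a b) c) e)).getD 0) = 0 := by
  have hm : min (min (min a b) c) e = a := by omega
  rw [hm]; simp [List.idxOf?, List.findIdx?_cons]

lemma pick1 (a b c e : Int) (h1 : b < a) (h2 : b ≤ c) (h3 : b ≤ e) :
    (([a, b, c, e].idxOf? (min (min (min a b) c) e)).getD 0) = 1 := by
  have hm : min (min (min a b) c) e = b := by omega
  rw [hm]
  have hab : (a == b) = false := by simp; omega
  simp [List.idxOf?, List.findIdx?_cons, hab]

lemma pick2 (a b c e : Int) (h1 : c < a) (h2 : c < b) (h3 : c ≤ e) :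
    (([a, b, c, e].idxOf? (min (min (min a b) c) e)).getD 0) = 2 := by
  have hm : min (min (min a b) c) e = c := by omega
  rw [hm]
  have hac : (a == c) = false := by simp; omega
  have hbc : (b == c) = false := by simp; omega
  simp [List.idxOf?, List.findIdx?_cons, hac, hbc]

lemma pick3 (a b c e : Int) (h1 : e < a) (h2 : e < b) (h3 : e < c) :
    (([a, b, c, e].idxOf? (min (min (min a b) c) e)).getD 0) = 3 := by
  have hm : min (min (min a b) c) e = e := by omega
  rw [hm]
  have hae : (a == e) = false := by simp; omega
  have hbe : (b == e) = false := by simp; omega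
  have hce : (c == e) = false := by simp; omega
  simp [List.idxOf?, List.findIdx?_cons, hae, hbe, hce]

lemma elo_color_eq (d : Int) (G N Y R : String) :
    PySem.List.pyGetD [G, N, Y, R]
      ((((PySem.List.index? ([(-50 : Int), 0, 40, 100].map (fun x => |d - x|))
          ((PySem.List.min? ([(-50 : Int), 0, 40, 100].map (fun x => |d - x|)) (fun y => y)).getD 0)).getD 0 : Nat) : Int)) ""
    = (if d ≤ -25 then G else if d ≤ 20 then N else if d ≤ 70 then Y else R) := by
  have n1 := abs_nonneg (d - (-50)); have n2 := abs_nonneg (d - 0)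
  have n3 := abs_nonneg (d - 40); have n4 := abs_nonneg (d - 100)
  have c1 := abs_choice (d - (-50)); have c2 := abs_choice (d - 0)
  have c3 := abs_choice (d - 40); have c4 := abs_choice (d - 100)
  simp only [List.map, PySem.List.min?_id_cons, List.foldl, Option.getD_some,
    PySem.List.index?_eq_idxOf?]
  by_cases h1 : d ≤ -25
  · rw [pick0 _ _ _ _ (by rcases c1 with h|h <;> rcases c2 with h'|h' <;> omega)
        (by rcases c1 with h|h <;> rcases c3 with h'|h' <;> omega)
        (by rcases c1 with h|h <;> rcases c4 with h'|h' <;> omega), if_pos h1]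
    simp [PySem.List.pyGetD, PySem.List.pyGet?, PySem.List.pyIdx?]
  by_cases h2 : d ≤ 20
  · rw [pick1 _ _ _ _ (by rcases c1 with h|h <;> rcases c2 with h'|h' <;> omega)
        (by rcases c2 with h|h <;> rcases c3 with h'|h' <;> omega)
        (by rcases c2 with h|h <;> rcases c4 with h'|h' <;> omega), if_neg (by omega), if_pos h2]
    simp [PySem.List.pyGetD, PySem.List.pyGet?, PySem.List.pyIdx?]
  by_cases h3 : d ≤ 70
  · rw [pick2 _ _ _ _ (by rcases c1 with h|h <;> rcases c3 with h'|h' <;> omega)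
        (by rcases c2 with h|h <;> rcases c3 with h'|h' <;> omega)
        (by rcases c3 with h|h <;> rcases c4 with h'|h' <;> omega), if_neg (by omega), if_neg (by omega), if_pos h3]
    simp [PySem.List.pyGetD, PySem.List.pyGet?, PySem.List.pyIdx?]
  · rw [pick3 _ _ _ _ (by rcases c1 with h|h <;> rcases c4 with h'|h' <;> omega)
        (by rcases c2 with h|h <;> rcases c4 with h'|h' <;> omega)
        (by rcases c3 with h|h <;> rcases c4 with h'|h' <;> omega),
        if_neg (by omega), if_neg (by omega), if_neg (by omega)]
    simp [PySem.List.pyGetD, PySem.List.pyGet?, PySem.List.pyIdx?]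

-- ===== VERDICT (by name: the statement is the Claim_ definition above) =====
theorem color_it_spec : Claim_equal_color_it := by
  intro data smurfcode ref_elo _ hpre
  unfold Spec_color_it color_it color_it_alt pvWrap
  obtain ⟨h1, h2⟩ := hpre
  have helo := elo_color_eq (data.2.1 - ref_elo) "\x1b[0;32;40m" "\x1b[0m" "\x1b[0;33;40m" "\x1b[0;31;40m"
  interval_cases smurfcode <;>
    simp only [helo] <;> norm_num [PySem.Int.band, PySem.Int.mod, PySem.Int.floordiv, PySem.List.pyGetD] <;> decide
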